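-- pv_equiv track=rewrite | github.com/tirinox/thorchainmonitorbot | app/proto/__init__.py | thor_decode_amount_field
-- ===== SOURCE A (Python) =====
-- def thor_decode_amount_field(string: str):
--     """ e.g. 114731984rune """
--     amt, asset = '', ''
--     still_numbers = True
--
--     for symbol in string:
--         if not str.isdigit(symbol):
--             still_numbers = False
--         if still_numbers:
--             amt += symbol
--         else:
--             asset += symbol
--
--     return (int(amt) if amt else 0), asset
-- ===== SOURCE B (Python) =====
-- def thor_decode_amount_field(string: str):
--     """ e.g. 114731984rune """
--     i, n = 0, len(string)
--     while i < n and string[i].isdigit():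
--         i += 1
--     amt = string[:i]
--     return (int(amt) if amt else 0), string[i:]
-- ===== Notes on version B (the rewrite author's own statement) =====
-- stated objective: faster
-- what changed: B finds the first non-digit index with a boundary scan and slices the string once, instead of A's per-character bucketing into two string accumulators via a sticky flag.
import Mathlib
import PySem

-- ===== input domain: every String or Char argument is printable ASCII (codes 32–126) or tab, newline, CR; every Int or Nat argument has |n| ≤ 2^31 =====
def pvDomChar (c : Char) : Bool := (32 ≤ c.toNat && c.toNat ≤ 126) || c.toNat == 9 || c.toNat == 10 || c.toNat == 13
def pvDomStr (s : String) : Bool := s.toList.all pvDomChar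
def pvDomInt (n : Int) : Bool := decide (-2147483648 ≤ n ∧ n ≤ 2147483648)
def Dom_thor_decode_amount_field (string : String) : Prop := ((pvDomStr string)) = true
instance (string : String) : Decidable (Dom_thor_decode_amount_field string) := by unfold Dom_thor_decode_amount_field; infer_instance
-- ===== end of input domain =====

-- B replaces A's per-character bucketing (sticky flag, two string accumulators) by
-- finding the first non-digit index and slicing once; return value is identical.

-- ===== PORT A =====
-- one step of A's for-loop: state = (amt, asset, still_numbers)
def pvStepA (st : List Char × List Char × Bool) (symbol : Char) : List Char × List Char × Bool :=
  let still := if ¬ PySem.Chars.isdigit symbol then false else st.2.2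
  if still then (st.1 ++ [symbol], st.2.1, still) else (st.1, st.2.1 ++ [symbol], still)

def thor_decode_amount_field (string : String) : Int × String :=
  let st := string.toList.foldl pvStepA ([], [], true)
  -- int(amt): amt consists of digit characters whenever nonempty, so int() never raises; getD 0 is unreachable
  ((if st.1 ≠ [] then (PySem.Int.ofChars? st.1).getD 0 else 0), String.mk st.2.1)

-- ===== PORT B =====
-- B's while-loop: advance i while string[i] is a digit
def pvDigitIdx : List Char → Nat
  | [] => 0
  | c :: cs => if PySem.Chars.isdigit c then pvDigitIdx cs + 1 else 0

def thor_decode_amount_field_alt (string : String) : Int × String :=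
  let cs := string.toList
  let i := pvDigitIdx cs
  let amt := cs.take i        -- string[:i], i ≤ len
  ((if amt ≠ [] then (PySem.Int.ofChars? amt).getD 0 else 0), String.mk (cs.drop i))  -- string[i:]

-- ===== PRECONDITION & SPEC =====
def Spec_thor_decode_amount_field (string : String) (out : Int × String) : Prop := out = thor_decode_amount_field_alt string
instance (string : String) (out : Int × String) : Decidable (Spec_thor_decode_amount_field string out) := by unfold Spec_thor_decode_amount_field; infer_instance

-- ===== CLAIM (what is proved, stated in full; the proofs are below) =====
def Claim_equal_thor_decode_amount_field : Prop := ∀ (string : String), Dom_thor_decode_amount_field string → Spec_thor_decode_amount_field string (thor_decode_amount_field string)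

-- ===== LEMMAS AND PROOFS =====
theorem foldA_false (cs : List Char) (amt asset : List Char) :
    cs.foldl pvStepA (amt, asset, false) = (amt, asset ++ cs, false) := by
  induction cs generalizing asset with
  | nil => simp
  | cons c cs ih => simp [pvStepA, ih]

theorem foldA_true (cs : List Char) (amt : List Char) :
    cs.foldl pvStepA (amt, [], true) =
      (amt ++ cs.takeWhile PySem.Chars.isdigit,
       cs.dropWhile PySem.Chars.isdigit,
       cs.all PySem.Chars.isdigit) := by
  induction cs generalizing amt with
  | nil => simp
  | cons c cs ih =>
    by_cases h : PySem.Chars.isdigit c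
    · simp [pvStepA, h, List.foldl_cons, ih, List.takeWhile_cons, List.dropWhile_cons]
    · simp [pvStepA, h, List.foldl_cons, foldA_false, List.takeWhile_cons, List.dropWhile_cons]

theorem pvDigitIdx_take (cs : List Char) :
    cs.take (pvDigitIdx cs) = cs.takeWhile PySem.Chars.isdigit := by
  induction cs with
  | nil => rfl
  | cons c cs ih =>
    by_cases h : PySem.Chars.isdigit c
    · simp [pvDigitIdx, h, List.takeWhile_cons, ih]
    · simp [pvDigitIdx, h, List.takeWhile_cons]

theorem pvDigitIdx_drop (cs : List Char) :
    cs.drop (pvDigitIdx cs) = cs.dropWhile PySem.Chars.isdigit := by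
  induction cs with
  | nil => rfl
  | cons c cs ih =>
    by_cases h : PySem.Chars.isdigit c
    · simp [pvDigitIdx, h, ih]
    · simp [pvDigitIdx, h]

-- ===== VERDICT (by name: the statement is the Claim_ definition above) =====
theorem thor_decode_amount_field_spec : Claim_equal_thor_decode_amount_field := by
  intro s _
  unfold Spec_thor_decode_amount_field thor_decode_amount_field thor_decode_amount_field_alt
  simp [foldA_true, pvDigitIdx_take, pvDigitIdx_drop]
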